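-- pv_equiv track=rewrite | github.com/dk1litk/magic_exe_dll | kalkulacije_exe/kalk_excel.py | sum_formula
-- ===== SOURCE A (Python) =====
-- COL_ZNESEK = "H"
--
-- def sum_formula(rows_xlsx: list[int]) -> str:
--     if not rows_xlsx:
--         return ""
--     rows_xlsx = sorted(rows_xlsx)
--     if len(rows_xlsx) > 1 and all(rows_xlsx[i] + 1 == rows_xlsx[i + 1]
--                                    for i in range(len(rows_xlsx) - 1)):
--         return f"=SUM({COL_ZNESEK}{rows_xlsx[0]}:{COL_ZNESEK}{rows_xlsx[-1]})"
--     refs = ",".join(f"{COL_ZNESEK}{r}" for r in rows_xlsx)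
--     return f"=SUM({refs},)"
-- ===== SOURCE B (Python) =====
-- COL_ZNESEK = "H"
--
-- def sum_formula(rows_xlsx: list[int]) -> str:
--     if not rows_xlsx:
--         return ""
--     lo = min(rows_xlsx)
--     hi = max(rows_xlsx)
--     n = len(rows_xlsx)
--     if n > 1 and hi - lo == n - 1 and len(set(rows_xlsx)) == n:
--         return f"=SUM({COL_ZNESEK}{lo}:{COL_ZNESEK}{hi})"
--     return "=SUM(" + ",".join(COL_ZNESEK + str(r) for r in sorted(rows_xlsx)) + ",)"
-- ===== Notes on version B (the rewrite author's own statement) =====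
-- stated objective: alternative
-- what changed: The sorted-adjacent-pairs consecutiveness scan is replaced by a closed-form test on the unsorted input (max - min == n-1 plus distinctness via a set), so the range branch never sorts; sorting happens only to build the comma-joined reference list.
import Mathlib
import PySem

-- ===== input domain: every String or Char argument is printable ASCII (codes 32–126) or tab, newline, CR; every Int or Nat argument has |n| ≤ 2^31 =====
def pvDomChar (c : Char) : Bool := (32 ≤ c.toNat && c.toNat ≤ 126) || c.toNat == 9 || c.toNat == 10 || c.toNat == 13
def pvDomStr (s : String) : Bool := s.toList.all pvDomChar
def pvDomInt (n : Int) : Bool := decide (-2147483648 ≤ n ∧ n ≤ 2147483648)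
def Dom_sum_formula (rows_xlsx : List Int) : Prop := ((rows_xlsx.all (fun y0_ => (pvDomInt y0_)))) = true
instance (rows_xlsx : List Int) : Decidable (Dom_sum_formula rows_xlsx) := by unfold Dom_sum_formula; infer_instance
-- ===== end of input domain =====

-- B replaces A's adjacent-pairs scan of the sorted list by a closed-form min/max span + set-distinctness
-- test on the unsorted input (alternative decomposition, same worst-case cost).

-- ===== PORT A =====
-- literal port of A: empty guard, sort, adjacent-pairs `all` over range(len-1), then the two f-strings
-- (the `.getD 0` defaults are never taken: every index the range produces is valid).
def sum_formula (rows_xlsx : List Int) : String :=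
  if rows_xlsx.isEmpty then "" else
  let rows := PySem.List.sorted rows_xlsx (fun x => x) false
  if 1 < (rows.length : Int) ∧
     ((PySem.List.pyRange 0 ((rows.length : Int) - 1) 1).all
       (fun i => ((PySem.List.pyGet? rows i).getD 0 + 1) == (PySem.List.pyGet? rows (i + 1)).getD 0)) then
    "=SUM(H" ++ PySem.Int.toStr ((PySem.List.pyGet? rows 0).getD 0) ++ ":H"
      ++ PySem.Int.toStr ((PySem.List.pyGet? rows (-1)).getD 0) ++ ")"
  else
    "=SUM(" ++ PySem.Str.join "," (rows.map (fun r => "H" ++ PySem.Int.toStr r)) ++ ",)"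

-- ===== PORT B =====
-- literal port of B: min/max/len/set tested on the unsorted list; sort only in the join branch
-- (the `.getD 0` defaults are never taken: the list is nonempty past the guard).
def sum_formula_alt (rows_xlsx : List Int) : String :=
  if rows_xlsx.isEmpty then "" else
  let lo := (PySem.List.min? rows_xlsx (fun x => x)).getD 0
  let hi := (PySem.List.max? rows_xlsx (fun x => x)).getD 0
  let n : Int := rows_xlsx.length
  if 1 < n ∧ hi - lo = n - 1 ∧ ((PySem.Set.ofList rows_xlsx).length : Int) = n then
    "=SUM(H" ++ PySem.Int.toStr lo ++ ":H" ++ PySem.Int.toStr hi ++ ")"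
  else
    "=SUM(" ++ PySem.Str.join ","
      ((PySem.List.sorted rows_xlsx (fun x => x) false).map (fun r => "H" ++ PySem.Int.toStr r)) ++ ",)"

-- ===== PRECONDITION & SPEC =====
def Spec_sum_formula (rows_xlsx : List Int) (out : String) : Prop := out = sum_formula_alt rows_xlsx
instance (rows_xlsx : List Int) (out : String) : Decidable (Spec_sum_formula rows_xlsx out) := by unfold Spec_sum_formula; infer_instance

-- ===== CLAIM (what is proved, stated in full; the proofs are below) =====
def Claim_equal_sum_formula : Prop := ∀ (rows_xlsx : List Int), Dom_sum_formula rows_xlsx → Spec_sum_formula rows_xlsx (sum_formula rows_xlsx)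

-- ===== LEMMAS AND PROOFS =====

-- set(xs) keeps a subsequence of xs (first occurrences in order)
theorem pv_ofList_sublist (xs : List Int) : (PySem.Set.ofList xs).Sublist xs := by
  induction xs using List.reverseRecOn with
  | nil => simp [PySem.Set.ofList_nil]
  | append_singleton xs x ih =>
    rw [PySem.Set.ofList_append_singleton, PySem.Set.add_eq_ite]
    split
    · exact ih.trans (List.sublist_append_left xs [x])
    · exact ih.append_right [x]
theorem pv_ofList_length_iff (xs : List Int) :
    (PySem.Set.ofList xs).length = xs.length ↔ xs.Nodup := by
  constructor
  · intro h
    have := (pv_ofList_sublist xs).eq_of_length h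
    rw [← this]; exact PySem.Set.nodup_ofList xs
  · intro h; rw [PySem.Set.ofList_eq_self_of_nodup _ h]

-- on a (≤)-sorted list, the adjacent "+1" chain holds iff the list is duplicate-free and spans last-head = len-1
theorem pv_chain_iff (s : List Int) (hs : s.Pairwise (· ≤ ·)) (hn : 1 < s.length) :
    (∀ i (h : i + 1 < s.length), s[i] + 1 = s[i+1]) ↔
      (s.Nodup ∧ s[s.length - 1]'(by omega) - s[0]'(by omega) = (s.length : Int) - 1) := by
  constructor
  · intro h
    have key : ∀ i (hi : i < s.length), s[i] = s[0]'(by omega) + i := by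
      intro i
      induction i with
      | zero => intro _; simp
      | succ k ih =>
        intro hk
        have hk' : k + 1 < s.length := hk
        have := h k hk'
        have := ih (by omega)
        push_cast
        omega
    constructor
    · rw [List.nodup_iff_getElem?_ne_getElem?]
      intro i j hij hj
      rw [List.getElem?_eq_getElem (by omega), List.getElem?_eq_getElem hj]
      have h1 := key i (by omega)
      have h2 := key j hj
      intro hc
      rw [Option.some_inj] at hc
      rw [h1, h2] at hc
      omega
    · have h1 := key (s.length - 1) (by omega)
      rw [h1]
      push_cast [Nat.cast_sub (by omega : 1 ≤ s.length)]
      ring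
  · rintro ⟨hnd, hspan⟩
    have hlt : ∀ i j (hi : i < j) (hj : j < s.length), s[i]'(by omega) < s[j] := by
      intro i j hi hj
      have h1 := List.pairwise_iff_getElem.mp hs i j (by omega) hj hi
      have h2 : s[i]'(by omega) ≠ s[j] := List.pairwise_iff_getElem.mp hnd i j (by omega) hj hi
      omega
    have gap : ∀ d i (hid : i + d < s.length), s[i]'(by omega) + (d : Int) ≤ s[i + d] := by
      intro d
      induction d with
      | zero => intro i hi; simp
      | succ k ih =>
        intro i hi
        have h1 := ih i (by omega)
        have h2 := hlt (i + k) (i + k + 1) (by omega) (by omega)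
        have h3 : s[i + (k+1)]'(by omega) = s[i + k + 1]'(by omega) := rfl
        push_cast
        omega
    have key : ∀ i (hi : i < s.length), s[i] = s[0]'(by omega) + i := by
      intro i hi
      have h1 := gap i 0 (by omega)
      simp only [Nat.zero_add] at h1
      have h2 := gap (s.length - 1 - i) i (by omega)
      have he : i + (s.length - 1 - i) = s.length - 1 := by omega
      simp only [he] at h2
      have hc : ((s.length - 1 - i : Nat) : Int) = (s.length : Int) - 1 - i := by omega
      rw [hc] at h2
      omega
    intro i h
    have h1 := key i (by omega)
    have h2 := key (i+1) h
    push_cast at h2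
    omega

-- A and B agree on every input
theorem sum_formula_spec' (rows : List Int) : sum_formula rows = sum_formula_alt rows := by
  unfold sum_formula sum_formula_alt
  by_cases he : rows.isEmpty
  · simp only [he, if_true]
  · have hf : rows.isEmpty = false := by simpa using he
    simp only [hf, Bool.false_eq_true, if_false]
    have hne : rows ≠ [] := by simpa [List.isEmpty_iff] using he
    set s := PySem.List.sorted rows (fun x => x) false with hs_def
    have hperm : s.Perm rows := PySem.List.sorted_perm rows (fun x => x) false
    have hlen : s.length = rows.length := hperm.length_eq
    have hslen : 0 < s.length := by
      rw [hlen]; exact List.length_pos_iff.mpr hne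
    have hpw : s.Pairwise (· ≤ ·) := PySem.List.sorted_pairwise rows (fun x => x)
    have hsne : s ≠ [] := List.ne_nil_of_length_pos hslen
    obtain ⟨a, t, hst⟩ := List.exists_cons_of_ne_nil hsne
    have ha : s[0]'hslen = a := by simp [hst]
    -- lo = head of the sorted list
    have hlo : (PySem.List.min? rows (fun x => x)).getD 0 = s[0]'hslen := by
      obtain ⟨m, hm⟩ := Option.ne_none_iff_exists'.mp
        (fun h => hne ((PySem.List.min?_eq_none_iff rows (fun x => x)).mp h))
      rw [hm]
      have hmin : ∀ y ∈ rows, m ≤ y := PySem.List.min?_isMin hm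
      have hhead : ∀ y ∈ rows, a ≤ y :=
        PySem.List.key_head_sorted_le rows (fun x => x) (hs_def.symm.trans hst)
      have h1 : m ≤ s[0]'hslen := hmin _ (hperm.subset (List.getElem_mem hslen))
      have h2 : a ≤ m := hhead m (PySem.List.min?_mem hm)
      rw [ha] at h1 ⊢
      simpa using le_antisymm h1 h2
    -- hi = last of the sorted list
    have hmax_s : ∀ y ∈ s, y ≤ s[s.length - 1]'(by omega) := by
      intro y hy
      obtain ⟨j, hj, rfl⟩ := List.mem_iff_getElem.mp hy
      rcases Nat.lt_or_ge j (s.length - 1) with hj' | hj'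
      · exact List.pairwise_iff_getElem.mp hpw j (s.length - 1) hj (by omega) hj'
      · have : j = s.length - 1 := by omega
        subst this; exact le_refl _
    have hhi : (PySem.List.max? rows (fun x => x)).getD 0 = s[s.length - 1]'(by omega) := by
      obtain ⟨m, hm⟩ := Option.ne_none_iff_exists'.mp
        (fun h => hne ((PySem.List.max?_eq_none_iff rows (fun x => x)).mp h))
      rw [hm]
      have hmax : ∀ y ∈ rows, y ≤ m := PySem.List.max?_isMax hm
      have h1 : s[s.length - 1]'(by omega) ≤ m :=
        hmax _ (hperm.subset (List.getElem_mem (by omega)))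
      have h2 : m ≤ s[s.length - 1]'(by omega) :=
        hmax_s m (hperm.mem_iff.mpr (PySem.List.max?_mem hm))
      simpa using le_antisymm h2 h1
    -- the all(...) over range(len-1) is the adjacent chain
    have hchain : (((PySem.List.pyRange 0 ((s.length : Int) - 1) 1).all
        (fun i => ((PySem.List.pyGet? s i).getD 0 + 1) == (PySem.List.pyGet? s (i + 1)).getD 0)) = true)
        ↔ ∀ j (h : j + 1 < s.length), s[j] + 1 = s[j+1] := by
      rw [List.all_eq_true]
      constructor
      · intro h j hj
        have hmem : (j : Int) ∈ PySem.List.pyRange 0 ((s.length : Int) - 1) 1 :=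
          (PySem.List.mem_pyRange_one).mpr ⟨by positivity, by omega⟩
        have h' := h _ hmem
        have hcast : (j : Int) + 1 = ((j + 1 : Nat) : Int) := by push_cast; ring
        rw [hcast] at h'
        simp only [PySem.List.pyGet?_natCast] at h'
        rw [List.getElem?_eq_getElem (by omega), List.getElem?_eq_getElem hj] at h'
        simpa using h'
      · intro h i hi
        rw [PySem.List.mem_pyRange_one] at hi
        obtain ⟨h0, hlt⟩ := hi
        lift i to Nat using h0 with j
        have hj : j + 1 < s.length := by omega
        have hcast : (j : Int) + 1 = ((j + 1 : Nat) : Int) := by push_cast; ring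
        rw [hcast]
        simp only [PySem.List.pyGet?_natCast]
        rw [List.getElem?_eq_getElem (by omega), List.getElem?_eq_getElem hj]
        simpa using h j hj
    -- equivalence of the two branch conditions
    have hiff : (1 < (s.length : Int) ∧
        ((PySem.List.pyRange 0 ((s.length : Int) - 1) 1).all
          (fun i => ((PySem.List.pyGet? s i).getD 0 + 1) == (PySem.List.pyGet? s (i + 1)).getD 0)) = true)
        ↔ (1 < (rows.length : Int) ∧
            (PySem.List.max? rows (fun x => x)).getD 0 - (PySem.List.min? rows (fun x => x)).getD 0
              = (rows.length : Int) - 1 ∧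
            ((PySem.Set.ofList rows).length : Int) = (rows.length : Int)) := by
      constructor
      · rintro ⟨h1, h2⟩
        have h1' : 1 < s.length := by exact_mod_cast h1
        obtain ⟨hnd, hspan⟩ := (pv_chain_iff s hpw h1').mp (hchain.mp h2)
        refine ⟨by rw [← hlen]; exact h1, ?_, ?_⟩
        · rw [hlo, hhi, ← hlen]; exact hspan
        · have : rows.Nodup := hperm.nodup_iff.mp hnd
          exact_mod_cast (pv_ofList_length_iff rows).mpr this
      · rintro ⟨h1, h2, h3⟩
        have h1' : 1 < s.length := by rw [hlen]; exact_mod_cast h1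
        refine ⟨by exact_mod_cast h1', hchain.mpr ((pv_chain_iff s hpw h1').mpr ⟨?_, ?_⟩)⟩
        · exact hperm.nodup_iff.mpr ((pv_ofList_length_iff rows).mp (by exact_mod_cast h3))
        · rw [hlo, hhi] at h2
          have hc : s.length = rows.length := hlen
          omega
    by_cases hP : (1 < (s.length : Int) ∧
        ((PySem.List.pyRange 0 ((s.length : Int) - 1) 1).all
          (fun i => ((PySem.List.pyGet? s i).getD 0 + 1) == (PySem.List.pyGet? s (i + 1)).getD 0)) = true)
    · rw [if_pos hP, if_pos (hiff.mp hP)]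
      have e0 : (PySem.List.pyGet? s 0).getD 0 = s[0]'hslen := by
        rw [PySem.List.pyGet?_zero, List.getElem?_eq_getElem hslen]; rfl
      have e1 : (PySem.List.pyGet? s (-1)).getD 0 = s[s.length - 1]'(by omega) := by
        rw [PySem.List.pyGet?_neg_one, List.getLast?_eq_getElem?,
          List.getElem?_eq_getElem (by omega)]; rfl
      rw [e0, e1, hlo, hhi]
    · rw [if_neg hP, if_neg (fun h => hP (hiff.mpr h))]

-- ===== VERDICT (by name: the statement is the Claim_ definition above) =====
theorem sum_formula_spec : Claim_equal_sum_formula := by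
  intro rows _
  exact sum_formula_spec' rows
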